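-- pv_equiv track=rewrite | github.com/CharleiThorin/EventsManager | choice.py | compare_prices
-- ===== SOURCE A (Python) =====
-- def compare_prices(budget_value, category):
--     current_budget_px = budget_value
--     suppliers = []
--     for key in category.keys():
--         suppliers.append(key)
--     current_supplier = suppliers[0]
--     current_lowest_supplier_px = category[current_supplier]
--     for vendor in suppliers:
--         initial_vendor_px = current_lowest_supplier_px
--         current_vendor_px = category[vendor]
--         if current_vendor_px <= initial_vendor_px and current_vendor_px < current_lowest_supplier_px and \
--                 current_vendor_px < current_budget_px:
--             current_lowest_supplier_px = current_vendor_px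
--             current_supplier = vendor
--         if initial_vendor_px <= current_vendor_px < current_lowest_supplier_px and \
--                 current_vendor_px < current_budget_px:
--             current_lowest_supplier_px = current_vendor_px
--             current_supplier = vendor
--     return {current_supplier: current_lowest_supplier_px}
-- ===== SOURCE B (Python) =====
-- def compare_prices(budget_value, category):
--     affordable = [(s, p) for s, p in category.items() if p < budget_value]
--     if affordable:
--         supplier, price = min(affordable, key=lambda sp: sp[1])
--     else:
--         supplier = list(category)[0]
--         price = category[supplier]
--     return {supplier: price}
-- ===== Notes on version B (the rewrite author's own statement) =====
-- stated objective: simpler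
-- what changed: A's single running-minimum scan over the keys list with duplicated dict lookups and a convoluted double-if update is replaced by a filter of the items to those under budget followed by a min-by-price reduction (first minimal element), with the first supplier as fallback when nothing is affordable.
import Mathlib
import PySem

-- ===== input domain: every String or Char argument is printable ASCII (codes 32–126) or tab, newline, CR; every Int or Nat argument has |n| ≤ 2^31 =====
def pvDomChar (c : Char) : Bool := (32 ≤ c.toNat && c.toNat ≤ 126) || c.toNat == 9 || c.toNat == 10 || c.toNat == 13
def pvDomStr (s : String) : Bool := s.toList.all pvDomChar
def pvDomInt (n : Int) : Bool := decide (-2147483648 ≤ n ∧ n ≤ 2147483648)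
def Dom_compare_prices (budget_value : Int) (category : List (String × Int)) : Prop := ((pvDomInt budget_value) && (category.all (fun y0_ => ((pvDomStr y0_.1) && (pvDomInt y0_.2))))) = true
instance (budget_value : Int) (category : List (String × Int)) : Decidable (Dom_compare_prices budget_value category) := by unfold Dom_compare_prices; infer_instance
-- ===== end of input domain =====

-- B replaces A's running-minimum scan by a filter of the items to those under budget followed by a
-- min-by-price reduction (first minimal element), with the first supplier as fallback: simpler decomposition.

-- ===== PORT A =====
-- running-minimum scan: state (current_supplier, current_lowest_supplier_px), one step per vendor
def aStep (budget_value : Int) (d : PySem.Dict String Int) (st : String × Int) (vendor : String) : String × Int :=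
  let initial_vendor_px := st.2
  let current_vendor_px := ((d.get? vendor).getD 0)  -- category[vendor]; the key is always present (vendor comes from d.keys)
  let st1 := if current_vendor_px ≤ initial_vendor_px ∧ current_vendor_px < st.2 ∧ current_vendor_px < budget_value
             then (vendor, current_vendor_px) else st
  if initial_vendor_px ≤ current_vendor_px ∧ current_vendor_px < st1.2 ∧ current_vendor_px < budget_value
  then (vendor, current_vendor_px) else st1

def compare_prices (budget_value : Int) (category : List (String × Int)) : List (String × Int) :=
  let d : PySem.Dict String Int := PySem.Dict.mk category
  let suppliers := category.foldl (fun acc kv => acc ++ [kv.1]) []   -- the keys-appending loop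
  match suppliers with
  | [] => []   -- suppliers[0] raises IndexError here; excluded by Pre_
  | current_supplier :: _ =>
    let current_lowest_supplier_px := (d.get? current_supplier).getD 0   -- category[current_supplier]
    let st := suppliers.foldl (aStep budget_value d) (current_supplier, current_lowest_supplier_px)
    [st]

-- ===== PORT B =====
def compare_prices_alt (budget_value : Int) (category : List (String × Int)) : List (String × Int) :=
  let affordable := category.filter (fun sp => sp.2 < budget_value)
  match PySem.List.min? affordable (fun sp => sp.2) with
  | some sp => [sp]
  | none =>
    match category with
    | [] => []   -- list(category)[0] raises IndexError here; excluded by Pre_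
    | (s, _) :: _ => [(s, ((PySem.Dict.mk category).get? s).getD 0)]   -- category[s]

-- ===== PRECONDITION & SPEC =====
-- Pre_ excludes the empty dict, on which both A and B raise IndexError, and association lists with
-- duplicate keys, which do not represent any Python dict (a dict literal collapses them).
def Pre_compare_prices (budget_value : Int) (category : List (String × Int)) : Prop :=
  category ≠ [] ∧ (category.map Prod.fst).Nodup
instance (budget_value : Int) (category : List (String × Int)) : Decidable (Pre_compare_prices budget_value category) := by unfold Pre_compare_prices; infer_instance
def pvWitness_compare_prices : Int × (List (String × Int)) := (10, [("a", 12), ("b", 5), ("c", 5)])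
def Spec_compare_prices (budget_value : Int) (category : List (String × Int)) (out : List (String × Int)) : Prop := out = compare_prices_alt budget_value category
instance (budget_value : Int) (category : List (String × Int)) (out : List (String × Int)) : Decidable (Spec_compare_prices budget_value category out) := by unfold Spec_compare_prices; infer_instance

-- ===== CLAIM (what is proved, stated in full; the proofs are below) =====
def Claim_equal_compare_prices : Prop := ∀ (budget_value : Int) (category : List (String × Int)), Dom_compare_prices budget_value category → Pre_compare_prices budget_value category → Spec_compare_prices budget_value category (compare_prices budget_value category)

-- ===== LEMMAS AND PROOFS =====

-- proof-only helpers
def stepP (b : Int) (st kv : String × Int) : String × Int :=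
  if kv.2 < st.2 ∧ kv.2 < b then kv else st

def comb (a m : String × Int) : String × Int := if m.2 < a.2 then m else a

def minstep (acc : Option (String × Int)) (x : String × Int) : Option (String × Int) :=
  match acc with
  | none => some x
  | some m => if x.2 < m.2 then some x else some m

theorem min?_eq_foldl_minstep (xs : List (String × Int)) :
    PySem.List.min? xs (fun sp => sp.2) = xs.foldl minstep none := by
  unfold PySem.List.min?
  congr 1
  funext acc x
  cases acc <;> simp [minstep]

theorem comb_assoc (a x m : String × Int) : comb a (comb x m) = comb (comb a x) m := by
  unfold comb; split_ifs <;> first | rfl | omega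

theorem comb_absorb (a m : String × Int) : comb a (comb a m) = comb a m := by
  unfold comb; split_ifs <;> rfl

theorem minstep_some (a x : String × Int) : minstep (some a) x = some (comb a x) := by
  simp only [minstep, comb]; split_ifs <;> rfl

theorem foldl_minstep_some (t : List (String × Int)) (a : String × Int) :
    t.foldl minstep (some a) =
      some (match t.foldl minstep none with | none => a | some m => comb a m) := by
  induction t generalizing a with
  | nil => rfl
  | cons x t ih =>
    rw [List.foldl_cons, minstep_some, ih (comb a x),
        List.foldl_cons, show minstep none x = some x from rfl, ih x]
    cases h : t.foldl minstep none with
    | none => rfl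
    | some m =>
      show some (comb (comb a x) m) = some (comb a (comb x m))
      rw [comb_assoc]

theorem min?_cons (x : String × Int) (t : List (String × Int)) :
    PySem.List.min? (x :: t) (fun sp => sp.2) =
      some (match PySem.List.min? t (fun sp => sp.2) with
            | none => x | some m => comb x m) := by
  rw [min?_eq_foldl_minstep, min?_eq_foldl_minstep, List.foldl_cons,
      show minstep none x = some x from rfl]
  exact foldl_minstep_some t x

theorem stepP_eq_comb (b : Int) (st x : String × Int) (hx : x.2 < b) :
    stepP b st x = comb st x := by
  unfold stepP comb; split_ifs <;> first | rfl | omega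

theorem stepP_skip (b : Int) (st x : String × Int) (hx : ¬ x.2 < b) :
    stepP b st x = st := by
  unfold stepP; split_ifs <;> first | rfl | omega

-- A's running minimum equals "comb st (min over the affordable items)"
theorem foldl_stepP_eq_min (b : Int) (l : List (String × Int)) (st : String × Int) :
    l.foldl (stepP b) st =
      match PySem.List.min? (l.filter (fun sp => sp.2 < b)) (fun sp => sp.2) with
      | none => st | some m => comb st m := by
  induction l generalizing st with
  | nil => rfl
  | cons x t ih =>
    rw [List.foldl_cons]
    by_cases hx : x.2 < b
    · rw [List.filter_cons_of_pos (by simpa using hx), min?_cons,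
          stepP_eq_comb b st x hx, ih (comb st x)]
      cases h : PySem.List.min? (t.filter (fun sp => sp.2 < b)) (fun sp => sp.2) with
      | none => rfl
      | some m =>
        show comb (comb st x) m = comb st (comb x m)
        rw [comb_assoc]
    · rw [List.filter_cons_of_neg (by simpa using hx), stepP_skip b st x hx, ih st]

-- the keys loop builds category.map Prod.fst
theorem keys_foldl (l : List (String × Int)) (acc : List String) :
    l.foldl (fun acc kv => acc ++ [kv.1]) acc = acc ++ l.map Prod.fst := by
  induction l generalizing acc with
  | nil => simp
  | cons x t ih => simp [ih]

-- with no duplicate keys, looking a member's key up in the dict returns its value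
theorem get?_mk_of_mem (l : List (String × Int)) (hnd : (l.map Prod.fst).Nodup)
    (kv : String × Int) (hm : kv ∈ l) : (PySem.Dict.mk l).get? kv.1 = some kv.2 := by
  induction l with
  | nil => cases hm
  | cons x t ih =>
    simp only [List.map_cons, List.nodup_cons] at hnd
    rw [PySem.Dict.get?_mk_cons]
    cases hm with
    | head => simp
    | tail _ hm' =>
      have hne : x.1 ≠ kv.1 := by
        intro h; exact hnd.1 (h ▸ List.mem_map_of_mem hm')
      simp only [beq_iff_eq, hne, if_false]
      exact ih hnd.2 hm'

theorem aStep_eq_stepP (b : Int) (d : PySem.Dict String Int) (st : String × Int)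
    (k : String) (v : Int) (h : d.get? k = some v) :
    aStep b d st k = stepP b st (k, v) := by
  unfold aStep stepP
  rw [h]
  simp only [Option.getD_some]
  split_ifs <;> first | rfl | omega

theorem foldl_aStep_eq (b : Int) (d : PySem.Dict String Int) (l : List (String × Int))
    (hl : ∀ kv ∈ l, d.get? kv.1 = some kv.2) (st : String × Int) :
    (l.map Prod.fst).foldl (aStep b d) st = l.foldl (stepP b) st := by
  induction l generalizing st with
  | nil => rfl
  | cons x t ih =>
    simp only [List.map_cons, List.foldl_cons]
    rw [aStep_eq_stepP b d st x.1 x.2 (hl x (List.mem_cons_self ..))]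
    exact ih (fun kv h => hl kv (List.mem_cons_of_mem _ h)) _

-- ===== VERDICT (by name: the statement is the Claim_ definition above) =====
theorem compare_prices_spec : Claim_equal_compare_prices := by
  intro b category _ hpre
  unfold Spec_compare_prices
  obtain ⟨hne, hnd⟩ := hpre
  obtain ⟨⟨k0, v0⟩, rest, rfl⟩ : ∃ x t, category = x :: t := by
    cases category with
    | nil => exact absurd rfl hne
    | cons x t => exact ⟨x, t, rfl⟩
  have hget : ∀ kv ∈ (k0, v0) :: rest,
      (PySem.Dict.mk ((k0, v0) :: rest)).get? kv.1 = some kv.2 :=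
    fun kv h => get?_mk_of_mem _ hnd kv h
  have hk0 : (PySem.Dict.mk ((k0, v0) :: rest)).get? k0 = some v0 := by
    simpa using hget (k0, v0) (List.mem_cons_self ..)
  -- reduce A to the pure running-minimum fold over the items
  have hA : compare_prices b ((k0, v0) :: rest) =
      [((k0, v0) :: rest).foldl (stepP b) (k0, v0)] := by
    unfold compare_prices
    rw [keys_foldl]
    simp only [List.nil_append, List.map_cons]
    rw [hk0]
    simp only [Option.getD_some]
    rw [show (k0 :: List.map Prod.fst rest)
          = ((k0, v0) :: rest).map Prod.fst from rfl,
        foldl_aStep_eq b _ _ hget]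
  rw [hA, foldl_stepP_eq_min]
  simp only [compare_prices_alt, hk0, Option.getD_some]
  cases hmin : PySem.List.min? (((k0, v0) :: rest).filter (fun sp => sp.2 < b))
      (fun sp => sp.2) with
  | none => rfl
  | some m =>
    -- show comb (k0, v0) m = m
    show [comb (k0, v0) m] = [m]
    by_cases hv : v0 < b
    · rw [List.filter_cons_of_pos (by simpa using hv), min?_cons] at hmin
      cases hr : PySem.List.min? (rest.filter (fun sp => sp.2 < b)) (fun sp => sp.2) with
      | none =>
        rw [hr] at hmin
        simp only [Option.some.injEq] at hmin
        rw [← hmin]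
        show [comb (k0, v0) (k0, v0)] = [(k0, v0)]
        unfold comb; simp
      | some m' =>
        rw [hr] at hmin
        simp only [Option.some.injEq] at hmin
        rw [← hmin, comb_absorb]
    · have hmem := PySem.List.min?_mem hmin
      have hmb : m.2 < b := by
        have := (List.mem_filter.mp hmem).2
        simpa using this
      unfold comb
      simp only [show m.2 < v0 by omega, if_true]
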